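-- pv_equiv track=rewrite | github.com/b3h4re/Makarov_hw_SEPMP | year_1/contest2_spring_2024/test_problems/test_f.py | _get_placements
-- ===== SOURCE A (Python) =====
-- def _get_placements(rows, cols, cuts, placed):
--     for i in range(rows):
--         for j in range(cols):
--             if (i, j) in cuts:
--                 continue
--             for x, y in placed:
--                 if x == i or y == j:
--                     break
--             else:
--                 yield i, j
-- ===== SOURCE B (Python) =====
-- def _get_placements(rows, cols, cuts, placed):
--     used_rows = {x for x, _ in placed}
--     used_cols = {y for _, y in placed}
--     valid_rows = [i for i in range(rows) if i not in used_rows]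
--     if not valid_rows:
--         return
--     valid_cols = [j for j in range(cols) if j not in used_cols]
--     for i in valid_rows:
--         for j in valid_cols:
--             if (i, j) not in cuts:
--                 yield i, j
-- ===== Notes on version B (the rewrite author's own statement) =====
-- stated objective: alternative
-- what changed: B precomputes used row/column sets from placed and iterates only over the surviving rows and columns, so the per-cell scan of placed disappears; A scans placed inside every cell.
import Mathlib
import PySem

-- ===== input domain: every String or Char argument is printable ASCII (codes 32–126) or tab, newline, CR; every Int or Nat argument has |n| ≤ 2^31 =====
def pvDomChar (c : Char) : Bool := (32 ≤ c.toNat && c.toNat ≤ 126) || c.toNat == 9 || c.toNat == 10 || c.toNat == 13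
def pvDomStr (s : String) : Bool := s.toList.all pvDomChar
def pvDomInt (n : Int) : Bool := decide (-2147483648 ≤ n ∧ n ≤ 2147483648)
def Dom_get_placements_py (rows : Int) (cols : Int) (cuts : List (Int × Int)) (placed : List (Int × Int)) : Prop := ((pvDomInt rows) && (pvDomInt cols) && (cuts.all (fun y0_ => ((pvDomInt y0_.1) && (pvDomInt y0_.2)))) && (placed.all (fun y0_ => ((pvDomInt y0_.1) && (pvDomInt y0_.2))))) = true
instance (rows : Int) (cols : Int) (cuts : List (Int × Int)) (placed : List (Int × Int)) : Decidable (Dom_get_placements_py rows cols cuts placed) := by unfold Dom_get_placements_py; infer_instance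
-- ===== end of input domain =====

-- B precomputes used row/column sets from `placed` and iterates only over the surviving
-- rows and columns, removing A's per-cell scan of `placed` (objective: alternative decomposition).

-- ===== PORT A =====
-- Port of A: nested loops over all cells; per cell, skip cuts, then scan placed (for-else = any)
def get_placements_py (rows : Int) (cols : Int) (cuts : List (Int × Int)) (placed : List (Int × Int)) : List (Int × Int) :=
  (PySem.List.pyRange 0 rows 1).flatMap (fun i =>
    (PySem.List.pyRange 0 cols 1).flatMap (fun j =>
      if (i, j) ∈ cuts then []
      else if placed.any (fun p => p.1 == i || p.2 == j) then []
      else [(i, j)]))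

-- ===== PORT B =====
-- Port of B: build used-row/used-col sets, filter the ranges once, loop over survivors
def get_placements_py_alt (rows : Int) (cols : Int) (cuts : List (Int × Int)) (placed : List (Int × Int)) : List (Int × Int) :=
  let usedRows : PySem.Set Int := PySem.Set.ofList (placed.map Prod.fst)
  let usedCols : PySem.Set Int := PySem.Set.ofList (placed.map Prod.snd)
  let validRows := (PySem.List.pyRange 0 rows 1).filter (fun i => !(PySem.Set.contains usedRows i))
  if validRows = [] then []
  else
    let validCols := (PySem.List.pyRange 0 cols 1).filter (fun j => !(PySem.Set.contains usedCols j))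
    validRows.flatMap (fun i =>
      validCols.flatMap (fun j =>
        if (i, j) ∈ cuts then [] else [(i, j)]))

-- ===== PRECONDITION & SPEC =====
def Spec_get_placements_py (rows : Int) (cols : Int) (cuts : List (Int × Int)) (placed : List (Int × Int)) (out : List (Int × Int)) : Prop := out = get_placements_py_alt rows cols cuts placed
instance (rows : Int) (cols : Int) (cuts : List (Int × Int)) (placed : List (Int × Int)) (out : List (Int × Int)) : Decidable (Spec_get_placements_py rows cols cuts placed out) := by unfold Spec_get_placements_py; infer_instance

-- ===== CLAIM (what is proved, stated in full; the proofs are below) =====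
def Claim_equal_get_placements_py : Prop := ∀ (rows : Int) (cols : Int) (cuts : List (Int × Int)) (placed : List (Int × Int)), Dom_get_placements_py rows cols cuts placed → Spec_get_placements_py rows cols cuts placed (get_placements_py rows cols cuts placed)

-- ===== LEMMAS AND PROOFS =====

-- flatMap over a filtered list = flatMap with the test pulled inside
theorem pv_flatMap_filter {α β : Type} (l : List α) (p : α → Bool) (f : α → List β) :
    (l.filter p).flatMap f = l.flatMap (fun x => if p x then f x else []) := by
  induction l with
  | nil => rfl
  | cons a t ih =>
    by_cases h : p a = true
    · simp [h, List.flatMap_cons, ih]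
    · simp [h, List.flatMap_cons, ih]

-- membership test on a built set = membership in the source list
theorem pv_contains_ofList (xs : List Int) (x : Int) :
    PySem.Set.contains (PySem.Set.ofList xs) x = decide (x ∈ xs) := by
  simp [PySem.Set.contains, PySem.Set.mem_ofList]

-- one row of A, when i is a used row, contributes nothing
theorem pv_row_used (cols : Int) (cuts : List (Int × Int)) (placed : List (Int × Int)) (i : Int)
    (h : i ∈ placed.map Prod.fst) :
    (PySem.List.pyRange 0 cols 1).flatMap (fun j =>
      if (i, j) ∈ cuts then []
      else if placed.any (fun p => p.1 == i || p.2 == j) then []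
      else [(i, j)]) = ([] : List (Int × Int)) := by
  rw [List.flatMap_eq_nil_iff]
  intro j _
  obtain ⟨p, hp, hfst⟩ := List.mem_map.mp h
  have hany : placed.any (fun p => p.1 == i || p.2 == j) = true := by
    refine List.any_eq_true.mpr ⟨p, hp, ?_⟩
    simp [hfst]
  split_ifs <;> simp_all

-- one row of A, when i is not a used row: the placed-scan tests only the column
theorem pv_row_free (cols : Int) (cuts : List (Int × Int)) (placed : List (Int × Int)) (i : Int)
    (h : i ∉ placed.map Prod.fst) :
    (PySem.List.pyRange 0 cols 1).flatMap (fun j =>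
      if (i, j) ∈ cuts then []
      else if placed.any (fun p => p.1 == i || p.2 == j) then []
      else [(i, j)]) =
    ((PySem.List.pyRange 0 cols 1).filter (fun j => !(decide (j ∈ placed.map Prod.snd)))).flatMap
      (fun j => if (i, j) ∈ cuts then [] else [(i, j)]) := by
  rw [pv_flatMap_filter]
  apply List.flatMap_congr
  intro j _
  have hany : placed.any (fun p => p.1 == i || p.2 == j) = decide (j ∈ placed.map Prod.snd) := by
    by_cases hc : j ∈ placed.map Prod.snd
    · obtain ⟨p, hp, hsnd⟩ := List.mem_map.mp hc
      rw [decide_eq_true hc]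
      exact List.any_eq_true.mpr ⟨p, hp, by simp [hsnd]⟩
    · rw [decide_eq_false hc]
      refine List.any_eq_false.mpr ?_
      intro p hp
      have h1 : ¬ p.1 = i := fun he => h (List.mem_map.mpr ⟨p, hp, he⟩)
      have h2 : ¬ p.2 = j := fun he => hc (List.mem_map.mpr ⟨p, hp, he⟩)
      simp [h1, h2]
  rw [hany]
  by_cases hc : j ∈ placed.map Prod.snd <;> split_ifs <;> simp_all

-- the early-return guard of B is a no-op on the value: flatMap over [] is []
theorem pv_guard {β : Type} (l : List Int) (f : Int → List β) :
    (if l = [] then [] else l.flatMap f) = l.flatMap f := by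
  by_cases h : l = [] <;> simp [h]

-- ===== VERDICT (by name: the statement is the Claim_ definition above) =====
theorem get_placements_py_spec : Claim_equal_get_placements_py := by
  intro rows cols cuts placed _
  unfold Spec_get_placements_py get_placements_py get_placements_py_alt
  simp only [pv_contains_ofList]
  rw [pv_guard]
  rw [pv_flatMap_filter]
  apply List.flatMap_congr
  intro i _
  by_cases hmem : i ∈ placed.map Prod.fst
  · rw [pv_row_used cols cuts placed i hmem]
    simp [hmem]
  · rw [pv_row_free cols cuts placed i hmem]
    simp [hmem]
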